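-- pv_equiv track=rewrite | github.com/datalad/metadata-model | tools/metadata_creator/create.py | _create_tree_paths
-- ===== SOURCE A (Python) =====
-- from typing import Dict, List, Tuple, Union
--
-- def _create_tree_paths(tree_spec: List[Tuple[int, int]], upper_levels: List[int]) -> List[str]:
--     upper_level_postfix = (
--         "." + ".".join(map(str, upper_levels))
--         if upper_levels
--         else ""
--     )
--     if len(tree_spec) == 1:
--         return [
--             f"dataset{upper_level_postfix}.{node_number}"
--             for node_number in range(tree_spec[0][0])
--         ]
--
--     # If we create a path that identifies a dataset, add it the the result list
--     result = [
--         f"dataset{upper_level_postfix}.{node_number}"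
--         for node_number in range(tree_spec[0][0])
--         if node_number < tree_spec[0][1]
--     ]
--
--     return result + [
--         f"dataset{upper_level_postfix}.{node_number}/" + sub_spec
--         if node_number < tree_spec[0][1]
--         else f"dir{upper_level_postfix}.{node_number}/" + sub_spec
--         for node_number in range(tree_spec[0][0])
--         for sub_spec in _create_tree_paths(tree_spec[1:], upper_levels + [node_number])
--     ]
-- ===== SOURCE B (Python) =====
-- from typing import List, Tuple
--
-- def _create_tree_paths(tree_spec: List[Tuple[int, int]], upper_levels: List[int]) -> List[str]:
--     # Iterative DFS with an explicit stack of frames (remaining spec, levels, path prefix).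
--     result = []
--     stack = [(tree_spec, tuple(upper_levels), "")]
--     while stack:
--         spec, levels, prefix = stack.pop()
--         postfix = "." + ".".join(map(str, levels)) if levels else ""
--         count, threshold = spec[0]
--         rest = spec[1:]
--         if not rest:
--             for n in range(count):
--                 result.append(f"{prefix}dataset{postfix}.{n}")
--             continue
--         for n in range(count):
--             if n < threshold:
--                 result.append(f"{prefix}dataset{postfix}.{n}")
--         for n in reversed(range(count)):
--             kind = "dataset" if n < threshold else "dir"
--             stack.append((rest, levels + (n,), f"{prefix}{kind}{postfix}.{n}/"))
--     return result
-- ===== Notes on version B (the rewrite author's own statement) =====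
-- stated objective: alternative
-- what changed: Replaces A's recursion (which builds each subtree's list and re-maps it with prefixes at every level) by an explicit iterative DFS: a worklist of (remaining spec, levels, accumulated path prefix) frames popped from a stack, appending finished paths to a single result list.
import Mathlib
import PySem

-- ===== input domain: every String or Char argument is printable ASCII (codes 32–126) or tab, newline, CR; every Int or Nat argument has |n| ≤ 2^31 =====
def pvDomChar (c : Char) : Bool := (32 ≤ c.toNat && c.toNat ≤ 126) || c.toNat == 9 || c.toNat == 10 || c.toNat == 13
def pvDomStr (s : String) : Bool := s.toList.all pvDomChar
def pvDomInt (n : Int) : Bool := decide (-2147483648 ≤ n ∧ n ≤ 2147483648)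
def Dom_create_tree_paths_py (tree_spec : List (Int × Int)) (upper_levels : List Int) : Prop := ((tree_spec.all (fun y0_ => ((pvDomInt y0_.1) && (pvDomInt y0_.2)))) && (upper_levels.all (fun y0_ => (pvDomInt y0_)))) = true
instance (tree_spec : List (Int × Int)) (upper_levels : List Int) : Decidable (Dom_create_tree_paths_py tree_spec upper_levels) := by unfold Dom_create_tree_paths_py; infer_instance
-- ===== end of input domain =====

-- B replaces A's sublist-concatenating recursion by an explicit iterative DFS over a stack of
-- (remaining spec, levels, accumulated path pfx) frames, appending to one result list (objective: alternative).

-- shared helper: Python's  "." + ".".join(map(str, levels)) if levels else ""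
def pvPostfix (levels : List Int) : String :=
  if levels ≠ [] then "." ++ PySem.Str.join "." (levels.map PySem.Int.toStr) else ""

-- ===== PORT A =====
def create_tree_paths_py (tree_spec : List (Int × Int)) (upper_levels : List Int) : List String :=
  let pfix := pvPostfix upper_levels
  match tree_spec with
  | [] => []  -- Python raises IndexError here (excluded by Pre_)
  | (c, t) :: rest =>
    if rest = [] then  -- len(tree_spec) == 1
      (PySem.List.pyRange 0 c 1).map (fun n => "dataset" ++ pfix ++ "." ++ PySem.Int.toStr n)
    else
      let result := ((PySem.List.pyRange 0 c 1).filter (fun n => decide (n < t))).map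
        (fun n => "dataset" ++ pfix ++ "." ++ PySem.Int.toStr n)
      result ++ (PySem.List.pyRange 0 c 1).flatMap (fun n =>
        (create_tree_paths_py rest (upper_levels ++ [n])).map (fun sub =>
          if n < t then "dataset" ++ pfix ++ "." ++ PySem.Int.toStr n ++ "/" ++ sub
          else "dir" ++ pfix ++ "." ++ PySem.Int.toStr n ++ "/" ++ sub))

-- ===== PORT B =====
-- termination measure for the worklist loop
def pvFrameWeight : List (Int × Int) → Nat
  | [] => 1
  | (c, _) :: rest => 1 + c.toNat * pvFrameWeight rest

def pvStackWeight (st : List (List (Int × Int) × List Int × String)) : Nat :=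
  (st.map (fun f => pvFrameWeight f.1)).sum

theorem pvFrameWeight_pos (spec : List (Int × Int)) : 0 < pvFrameWeight spec := by
  cases spec with
  | nil => simp [pvFrameWeight]
  | cons p rest => cases p; simp [pvFrameWeight]

theorem pvSum_map_const {α : Type} (l : List α) (w : Nat) :
    (l.map (fun _ => w)).sum = l.length * w := by
  induction l with
  | nil => simp
  | cons x xs ih => simp [ih, Nat.succ_mul]; omega

-- the while-loop of Source B; the Python stack has its top at the END of the list, so
-- 'push reversed(range(count)) then pop from the end' = prepend range(count) in order to this head-top stack
def pvLoop (stack : List (List (Int × Int) × List Int × String)) (result : List String) : List String :=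
  match stack with
  | [] => result
  | (spec, levels, pfx) :: stTail =>
    match spec with
    | [] => result  -- Python raises IndexError at spec[0] (only reachable when tree_spec = [], excluded by Pre_)
    | (c, t) :: rest =>
      let pfix := pvPostfix levels
      if rest = [] then
        pvLoop stTail (result ++ (PySem.List.pyRange 0 c 1).map
          (fun n => pfx ++ "dataset" ++ pfix ++ "." ++ PySem.Int.toStr n))
      else
        let result' := (PySem.List.pyRange 0 c 1).foldl
          (fun acc n => if n < t then acc ++ [pfx ++ "dataset" ++ pfix ++ "." ++ PySem.Int.toStr n] else acc)
          result
        let children := (PySem.List.pyRange 0 c 1).map (fun n =>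
          (rest, levels ++ [n],
           pfx ++ (if n < t then "dataset" else "dir") ++ pfix ++ "." ++ PySem.Int.toStr n ++ "/"))
        pvLoop (children ++ stTail) result'
termination_by pvStackWeight stack
decreasing_by
  · have := pvFrameWeight_pos ((c, t) :: rest)
    simp [pvStackWeight]; omega
  · simp only [pvStackWeight, List.map_append, List.sum_append, List.map_map, Function.comp_def]
    have h1 : ((PySem.List.pyRange 0 c 1).map (fun _ => pvFrameWeight rest)).sum
        = (PySem.List.pyRange 0 c 1).length * pvFrameWeight rest := pvSum_map_const _ _
    have h2 : (PySem.List.pyRange 0 c 1).length = (c - 0).toNat := PySem.List.length_pyRange_one 0 c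
    simp [pvFrameWeight, h1, h2]

def create_tree_paths_py_alt (tree_spec : List (Int × Int)) (upper_levels : List Int) : List String :=
  pvLoop [(tree_spec, upper_levels, "")] []

-- ===== PRECONDITION & SPEC =====
-- A raises IndexError (tree_spec[0]) exactly when tree_spec is empty; B raises there too.
def Pre_create_tree_paths_py (tree_spec : List (Int × Int)) (upper_levels : List Int) : Prop :=
  tree_spec ≠ []
instance (tree_spec : List (Int × Int)) (upper_levels : List Int) : Decidable (Pre_create_tree_paths_py tree_spec upper_levels) := by unfold Pre_create_tree_paths_py; infer_instance

def pvWitness_create_tree_paths_py : (List (Int × Int)) × List Int := ([(2, 1), (3, 2)], [1])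

def Spec_create_tree_paths_py (tree_spec : List (Int × Int)) (upper_levels : List Int) (out : List String) : Prop := out = create_tree_paths_py_alt tree_spec upper_levels
instance (tree_spec : List (Int × Int)) (upper_levels : List Int) (out : List String) : Decidable (Spec_create_tree_paths_py tree_spec upper_levels out) := by unfold Spec_create_tree_paths_py; infer_instance

-- ===== CLAIM (what is proved, stated in full; the proofs are below) =====
def Claim_equal_create_tree_paths_py : Prop := ∀ (tree_spec : List (Int × Int)) (upper_levels : List Int), Dom_create_tree_paths_py tree_spec upper_levels → Pre_create_tree_paths_py tree_spec upper_levels → Spec_create_tree_paths_py tree_spec upper_levels (create_tree_paths_py tree_spec upper_levels)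

-- ===== LEMMAS AND PROOFS =====

-- Popping one nonempty frame appends exactly A's (pfx-mapped) output for that frame.
theorem pvLoop_frame (spec : List (Int × Int)) (hne : spec ≠ []) :
    ∀ (levels : List Int) (pfx st : _) (res : List String),
      pvLoop ((spec, levels, pfx) :: st) res
        = pvLoop st (res ++ (create_tree_paths_py spec levels).map (fun s => pfx ++ s)) := by
  induction spec with
  | nil => exact absurd rfl hne
  | cons p rest ih =>
    obtain ⟨c, t⟩ := p
    intro levels pfx st res
    by_cases hr : rest = []
    · subst hr
      rw [pvLoop]
      simp [create_tree_paths_py, List.map_map, Function.comp_def, String.append_assoc]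
    · rw [pvLoop]
      simp only [if_neg hr]
      rw [PySem.List.foldl_append_ite]
      -- the pushed children are consumed left to right; fold over the range list
      have key : ∀ (ns : List Int) (st' : _) (res' : List String),
          pvLoop ((ns.map (fun n =>
              (rest, levels ++ [n],
               pfx ++ (if n < t then "dataset" else "dir") ++ pvPostfix levels ++ "." ++ PySem.Int.toStr n ++ "/"))) ++ st') res'
            = pvLoop st' (res' ++ ns.flatMap (fun n =>
                (create_tree_paths_py rest (levels ++ [n])).map (fun sub =>
                  pfx ++ ((if n < t then "dataset" ++ pvPostfix levels ++ "." ++ PySem.Int.toStr n ++ "/" ++ sub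
                              else "dir" ++ pvPostfix levels ++ "." ++ PySem.Int.toStr n ++ "/" ++ sub))))) := by
        intro ns
        induction ns with
        | nil => intro st' res'; simp
        | cons n ns ihn =>
          intro st' res'
          simp only [List.map_cons, List.cons_append, List.flatMap_cons]
          rw [ih hr, ihn]
          congr 1
          rw [List.append_assoc]
          congr 2
          apply List.map_congr_left
          intro sub _
          by_cases hn : n < t <;> simp [hn, String.append_assoc]
      rw [key]
      simp [create_tree_paths_py, if_neg hr, List.map_map, List.map_flatMap, Function.comp_def,
        String.append_assoc, List.append_assoc]

-- ===== VERDICT (by name: the statement is the Claim_ definition above) =====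
theorem create_tree_paths_py_spec : Claim_equal_create_tree_paths_py := by
  intro tree_spec upper_levels _ hpre
  unfold Spec_create_tree_paths_py create_tree_paths_py_alt
  rw [pvLoop_frame tree_spec hpre upper_levels "" [] []]
  rw [pvLoop]
  simp
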